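-- pv_equiv track=rewrite | github.com/udragon/circuit-complexity | utils/bit_utils.py | enumerate_bit_strings
-- ===== SOURCE A (Python) =====
-- from typing import Iterator, Optional, Tuple, List, Iterable, TypeVar
--
-- def enumerate_bit_strings(size: int, min_ones: int = 0, max_ones: Optional[int] = None) -> Iterator[Tuple[bool, ...]]:
--     if size == 0:
--         yield tuple()
--     elif min_ones == size:
--         yield (True, ) * size
--     else:
--         for string in enumerate_bit_strings(size - 1, min_ones=(min_ones - 1), max_ones=max_ones):
--             ones_count = sum(string)
--             if ones_count > min_ones - 1:
--                 yield string + (False, )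
--             if max_ones is None or ones_count < max_ones:
--                 yield string + (True, )
-- ===== SOURCE B (Python) =====
-- from typing import Iterator, Optional, Tuple
--
-- def enumerate_bit_strings(size: int, min_ones: int = 0, max_ones: Optional[int] = None) -> Iterator[Tuple[bool, ...]]:
--     if size == 0:
--         yield tuple()
--     elif min_ones == size:
--         yield (True,) * size
--     else:
--         level = [((), 0)]
--         for L in range(1, size + 1):
--             thr = min_ones - (size - L)
--             nxt = []
--             for s, c in level:
--                 if c >= thr:
--                     nxt.append((s + (False,), c))
--                 if max_ones is None or c < max_ones:
--                     nxt.append((s + (True,), c + 1))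
--             level = nxt
--         for s, _ in level:
--             yield s
-- ===== Notes on version B (the rewrite author's own statement) =====
-- stated objective: alternative
-- what changed: Replaces A's top-down recursive generator (which recomputes sum(string) for every prefix at every level) with an iterative bottom-up worklist of (prefix, ones_count) pairs built level by level, yielding the same strings in the same DFS order.
import Mathlib
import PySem

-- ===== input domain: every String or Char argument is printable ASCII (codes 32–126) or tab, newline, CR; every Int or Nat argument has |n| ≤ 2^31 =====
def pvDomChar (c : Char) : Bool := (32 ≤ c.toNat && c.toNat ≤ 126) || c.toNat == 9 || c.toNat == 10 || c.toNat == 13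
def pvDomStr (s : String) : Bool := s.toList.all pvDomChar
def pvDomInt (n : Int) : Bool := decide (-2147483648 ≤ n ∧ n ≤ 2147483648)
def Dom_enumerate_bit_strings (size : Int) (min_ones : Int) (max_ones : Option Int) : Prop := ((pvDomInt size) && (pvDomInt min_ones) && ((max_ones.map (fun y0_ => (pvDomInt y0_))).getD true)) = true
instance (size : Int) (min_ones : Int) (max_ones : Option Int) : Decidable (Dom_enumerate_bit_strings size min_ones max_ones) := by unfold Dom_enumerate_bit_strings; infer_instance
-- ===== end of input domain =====

-- B replaces A's top-down recursion by an iterative bottom-up worklist of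
-- (prefix, ones_count) pairs, avoiding the per-string recount sum(string); objective: alternative.

-- ===== PORT A =====
-- sum(string) for a tuple of bools
def pvCnt (s : List Bool) : Int := s.foldl (fun a b => a + (if b then 1 else 0)) 0

-- `max_ones is None or c < max_ones`
def pvMaxOk (mo : Option Int) (c : Int) : Bool :=
  match mo with
  | none => true
  | some M => decide (c < M)

-- the body of A's `for string in …` loop
def pvStepA (m : Int) (mo : Option Int) (prev : List (List Bool)) : List (List Bool) :=
  prev.foldl (fun acc s =>
    (acc ++ (if pvCnt s > m - 1 then [s ++ [false]] else []))
        ++ (if pvMaxOk mo (pvCnt s) then [s ++ [true]] else [])) []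

-- fuel = size.toNat makes the recursion structural; on every input admitted by
-- Pre_ the fuel is never exhausted, so this is exactly A's recursion.
def pvGoA : Nat → Int → Int → Option Int → List (List Bool)
  | fuel, size, m, mo =>
    if size = 0 then [[]]
    else if m = size then [List.replicate size.toNat true]
    else match fuel with
      | 0 => []
      | f + 1 => pvStepA m mo (pvGoA f (size - 1) (m - 1) mo)

def enumerate_bit_strings (size : Int) (min_ones : Int) (max_ones : Option Int) : List (List Bool) :=
  pvGoA size.toNat size min_ones max_ones

-- ===== PORT B =====
-- the body of B's inner `for s, c in level` loop
def pvStepB (thr : Int) (mo : Option Int) (lv : List (List Bool × Int)) : List (List Bool × Int) :=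
  lv.foldl (fun nxt p =>
    (nxt ++ (if p.2 ≥ thr then [(p.1 ++ [false], p.2)] else []))
        ++ (if pvMaxOk mo p.2 then [(p.1 ++ [true], p.2 + 1)] else [])) []

def enumerate_bit_strings_alt (size : Int) (min_ones : Int) (max_ones : Option Int) : List (List Bool) :=
  if size = 0 then [[]]
  else if min_ones = size then [List.replicate size.toNat true]
  else
    ((List.range size.toNat).foldl
      (fun lv (i : Nat) => pvStepB (min_ones - (size - ((i : Int) + 1))) max_ones lv)
      [([], 0)]).map Prod.fst

-- ===== PRECONDITION & SPEC =====
-- Pre_ excludes exactly the inputs where A raises: on size < 0 with min_ones ≠ size the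
-- recursion never reaches a base case and Python raises RecursionError.
def Pre_enumerate_bit_strings (size : Int) (min_ones : Int) (max_ones : Option Int) : Prop :=
  0 ≤ size ∨ min_ones = size
instance (size : Int) (min_ones : Int) (max_ones : Option Int) : Decidable (Pre_enumerate_bit_strings size min_ones max_ones) := by unfold Pre_enumerate_bit_strings; infer_instance
def pvWitness_enumerate_bit_strings : Int × Int × Option Int := (3, 1, some 2)

def Spec_enumerate_bit_strings (size : Int) (min_ones : Int) (max_ones : Option Int) (out : List (List Bool)) : Prop := out = enumerate_bit_strings_alt size min_ones max_ones
instance (size : Int) (min_ones : Int) (max_ones : Option Int) (out : List (List Bool)) : Decidable (Spec_enumerate_bit_strings size min_ones max_ones out) := by unfold Spec_enumerate_bit_strings; infer_instance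

-- ===== CLAIM (what is proved, stated in full; the proofs are below) =====
def Claim_equal_enumerate_bit_strings : Prop := ∀ (size : Int) (min_ones : Int) (max_ones : Option Int), Dom_enumerate_bit_strings size min_ones max_ones → Pre_enumerate_bit_strings size min_ones max_ones → Spec_enumerate_bit_strings size min_ones max_ones (enumerate_bit_strings size min_ones max_ones)

-- ===== LEMMAS AND PROOFS =====

-- B's level list with the threshold rewritten as d + i + 1, d = min_ones - size
def pvLevels (n : Nat) (d : Int) (mo : Option Int) : List (List Bool × Int) :=
  (List.range n).foldl (fun lv (i : Nat) => pvStepB (d + (i : Int) + 1) mo lv) [([], 0)]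

theorem pvCnt_app_false (s : List Bool) : pvCnt (s ++ [false]) = pvCnt s := by
  simp [pvCnt, List.foldl_append]

theorem pvCnt_app_true (s : List Bool) : pvCnt (s ++ [true]) = pvCnt s + 1 := by
  simp [pvCnt, List.foldl_append]

-- the worklist invariant: every carried count is the true ones-count
theorem pvStepB_inv (thr : Int) (mo : Option Int) (lv acc : List (List Bool × Int))
    (hlv : ∀ p ∈ lv, p.2 = pvCnt p.1) (hacc : ∀ p ∈ acc, p.2 = pvCnt p.1) :
    ∀ p ∈ lv.foldl (fun nxt p =>
      (nxt ++ (if p.2 ≥ thr then [(p.1 ++ [false], p.2)] else []))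
          ++ (if pvMaxOk mo p.2 then [(p.1 ++ [true], p.2 + 1)] else [])) acc,
      p.2 = pvCnt p.1 := by
  induction lv generalizing acc with
  | nil => simpa using hacc
  | cons q lv ih =>
    have hq : q.2 = pvCnt q.1 := hlv q (by simp)
    refine ih _ (fun p hp => hlv p (by simp [hp])) ?_
    intro p hp
    rcases List.mem_append.1 hp with hp | hp
    · rcases List.mem_append.1 hp with hp | hp
      · exact hacc p hp
      · split at hp <;> simp at hp
        subst hp; simp [pvCnt_app_false, hq]
    · split at hp <;> simp at hp
      subst hp; simp [pvCnt_app_true, hq]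

theorem pvLevels_inv (n : Nat) (d : Int) (mo : Option Int) :
    ∀ p ∈ pvLevels n d mo, p.2 = pvCnt p.1 := by
  induction n with
  | zero => intro p hp; simp [pvLevels] at hp; subst hp; simp [pvCnt]
  | succ n ih =>
    have h : pvLevels (n + 1) d mo = pvStepB (d + (n : Int) + 1) mo (pvLevels n d mo) := by
      simp [pvLevels, List.range_succ, List.foldl_append]
    rw [h]
    exact pvStepB_inv _ mo _ [] ih (by simp)

-- one B step, projected to strings, is one A step
theorem pvStep_comm_aux (m : Int) (mo : Option Int) (lv acc : List (List Bool × Int))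
    (hlv : ∀ p ∈ lv, p.2 = pvCnt p.1) :
    (lv.foldl (fun nxt p =>
      (nxt ++ (if p.2 ≥ m then [(p.1 ++ [false], p.2)] else []))
          ++ (if pvMaxOk mo p.2 then [(p.1 ++ [true], p.2 + 1)] else [])) acc).map Prod.fst
    = (lv.map Prod.fst).foldl (fun acc s =>
        (acc ++ (if pvCnt s > m - 1 then [s ++ [false]] else []))
            ++ (if pvMaxOk mo (pvCnt s) then [s ++ [true]] else [])) (acc.map Prod.fst) := by
  induction lv generalizing acc with
  | nil => simp
  | cons q lv ih =>
    have hq : q.2 = pvCnt q.1 := hlv q (by simp)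
    have hcond : (q.2 ≥ m) = (pvCnt q.1 > m - 1) := by
      rw [hq]; by_cases h : pvCnt q.1 ≥ m <;> simp [h] <;> omega
    rw [List.map_cons, List.foldl_cons, List.foldl_cons,
      ih _ (fun p hp => hlv p (by simp [hp]))]
    congr 1
    simp only [hq, List.map_append]
    by_cases hc : pvCnt q.1 ≥ m
    · by_cases hb : pvMaxOk mo (pvCnt q.1) = true <;>
        simp [hc, hb, show pvCnt q.1 > m - 1 by omega]
    · by_cases hb : pvMaxOk mo (pvCnt q.1) = true <;>
        simp [hc, hb, show ¬ pvCnt q.1 > m - 1 by omega]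

theorem pvStep_comm (m : Int) (mo : Option Int) (lv : List (List Bool × Int))
    (hlv : ∀ p ∈ lv, p.2 = pvCnt p.1) :
    (pvStepB m mo lv).map Prod.fst = pvStepA m mo (lv.map Prod.fst) := by
  simpa [pvStepB, pvStepA] using pvStep_comm_aux m mo lv [] hlv

-- main correspondence: A's recursion at size n equals B's n-level build
theorem pvMain (n : Nat) (m : Int) (mo : Option Int) (h : m ≠ (n : Int)) :
    pvGoA n (n : Int) m mo = (pvLevels n (m - (n : Int)) mo).map Prod.fst := by
  induction n generalizing m with
  | zero => simp [pvGoA, pvLevels]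
  | succ n ih =>
    have h1 : ((n : Int) + 1) ≠ 0 := by omega
    have h2 : m - 1 ≠ (n : Int) := by omega
    have hrec : pvGoA (n + 1) ((n + 1 : Nat) : Int) m mo
        = pvStepA m mo (pvGoA n (n : Int) (m - 1) mo) := by
      rw [pvGoA]
      push_cast
      simp only [if_neg h1, if_neg (by push_cast at h ⊢; omega : m ≠ (n : Int) + 1)]
      norm_num
    rw [hrec, ih (m - 1) h2]
    have hlev : pvLevels (n + 1) (m - ((n + 1 : Nat) : Int)) mo
        = pvStepB m mo (pvLevels n (m - 1 - (n : Int)) mo) := by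
      have hd : m - ((n + 1 : Nat) : Int) = m - 1 - (n : Int) := by push_cast; ring
      rw [hd]
      simp only [pvLevels, List.range_succ, List.foldl_append, List.foldl_cons, List.foldl_nil]
      rw [show m - 1 - (n : Int) + (n : Int) + 1 = m by ring]
    rw [hlev, pvStep_comm m mo _ (pvLevels_inv n _ mo)]

-- ===== VERDICT (by name: the statement is the Claim_ definition above) =====
theorem enumerate_bit_strings_spec : Claim_equal_enumerate_bit_strings := by
  intro size m mo _ hpre
  unfold Spec_enumerate_bit_strings
  by_cases h0 : size = 0
  · subst h0; simp [enumerate_bit_strings, pvGoA, enumerate_bit_strings_alt]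
  · by_cases hm : m = size
    · subst hm
      simp only [enumerate_bit_strings, enumerate_bit_strings_alt, if_neg h0, if_pos rfl]
      rw [pvGoA.eq_def]
      simp [h0]
    · have hpos : 0 ≤ size := by
        rcases hpre with h | h
        · exact h
        · exact absurd h hm
      obtain ⟨n, rfl⟩ : ∃ n : Nat, size = (n : Int) := ⟨size.toNat, by omega⟩
      have halt : enumerate_bit_strings_alt (n : Int) m mo
          = (pvLevels n (m - (n : Int)) mo).map Prod.fst := by
        unfold enumerate_bit_strings_alt pvLevels
        rw [if_neg h0, if_neg hm]
        congr 1
        congr 1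
        funext lv (i : Nat)
        have : m - ((n : Int) - ((i : Int) + 1)) = m - (n : Int) + (i : Int) + 1 := by ring
        rw [this]
      rw [halt, enumerate_bit_strings]
      simpa using pvMain n m mo hm
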